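-- pv_equiv track=rewrite | github.com/peterse/QDNN | main.py | get_permus
-- ===== SOURCE A (Python) =====
-- import itertools
--
-- def get_permus(n, mode="bin"):
--     """
--     return a list of all permutations of an n-length bitstring, with each
--     bitstring in listform
--     kwargs:
--         bin - lists of {0,1}
--         neg - lists of {-1,1}
--     """
--     configs =["".join(seq) for seq in itertools.product("01", repeat=n)]
--     configs = [[int(c) for c in s] for s in configs]
--
--     # replace all 0's with -1's
--     if mode == "neg":
--         for k, lst in enumerate(configs):
--             tmp = []
--             for i in lst:
--                 if i == 0:
--                     tmp.append(-1)
--                 else: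
--                     tmp.append(i)
--             configs[k] = tmp
--     return configs
-- ===== SOURCE B (Python) =====
-- def get_permus(n, mode="bin"):
--     """
--     return a list of all permutations of an n-length bitstring, with each
--     bitstring in listform
--     kwargs:
--         bin - lists of {0,1}
--         neg - lists of {-1,1}
--     """
--     total = 1 << n
--     if mode == "neg":
--         return [[1 if (i >> (n - 1 - j)) & 1 else -1 for j in range(n)]
--                 for i in range(total)]
--     return [[(i >> (n - 1 - j)) & 1 for j in range(n)] for i in range(total)]
-- ===== Notes on version B (the rewrite author's own statement) =====
-- stated objective: alternative
-- what changed: Replaces itertools.product over '01' plus string-join and per-char int() parsing (and the extra 0→-1 rewrite pass) with direct integer counting over range(2**n) and MSB-first bit extraction, emitting -1 directly in neg mode.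
import Mathlib
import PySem

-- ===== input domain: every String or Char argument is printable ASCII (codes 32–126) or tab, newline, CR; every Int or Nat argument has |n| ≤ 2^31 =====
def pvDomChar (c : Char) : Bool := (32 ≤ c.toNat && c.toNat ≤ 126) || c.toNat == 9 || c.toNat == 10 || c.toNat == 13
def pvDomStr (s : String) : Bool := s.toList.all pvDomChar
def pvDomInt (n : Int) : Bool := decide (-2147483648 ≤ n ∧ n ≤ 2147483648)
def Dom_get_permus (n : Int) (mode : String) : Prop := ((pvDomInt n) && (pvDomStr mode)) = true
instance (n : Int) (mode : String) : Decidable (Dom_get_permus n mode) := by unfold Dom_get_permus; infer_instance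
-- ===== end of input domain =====

-- B replaces itertools.product + string join + per-char int() + neg rewrite pass by integer
-- counting over range(2**n) with MSB-first bit extraction (alternative enumeration strategy).


-- ===== PORT A =====
-- itertools.product("01", repeat=k): rightmost position varies fastest; each row is the
-- joined tuple of chars ("".join of 1-char strings = the char list itself).
def pvProd01 : Nat → List (List Char)
  | 0 => [[]]
  | k + 1 => ['0', '1'].flatMap (fun c => (pvProd01 k).map (fun r => c :: r))

def get_permus (n : Int) (mode : String) : List (List Int) :=
  -- configs = [[int(c) for c in s] for s in ...]; int(c) via PySem.Int.ofChars? (never none on '0'/'1')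
  let configs := (pvProd01 n.toNat).map (fun s => s.map (fun c => (PySem.Int.ofChars? [c]).getD 0))
  if mode = "neg" then
    configs.map (fun lst => lst.map (fun i => if i = 0 then (-1 : Int) else i))
  else configs

-- ===== PORT B =====
def get_permus_alt (n : Int) (mode : String) : List (List Int) :=
  let N := n.toNat
  if mode = "neg" then
    (List.range (2 ^ N)).map (fun i =>
      (List.range N).map (fun j => if (i >>> (N - 1 - j)) &&& 1 ≠ 0 then (1 : Int) else -1))
  else
    (List.range (2 ^ N)).map (fun i =>
      (List.range N).map (fun j => (((i >>> (N - 1 - j)) &&& 1 : Nat) : Int)))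

-- ===== PRECONDITION & SPEC =====
-- A raises ValueError for n < 0 (itertools.product repeat cannot be negative); B raises too (1 << n).
def Pre_get_permus (n : Int) (mode : String) : Prop := 0 ≤ n
instance (n : Int) (mode : String) : Decidable (Pre_get_permus n mode) := by unfold Pre_get_permus; infer_instance
def pvWitness_get_permus : Int × String := (2, "neg")

def Spec_get_permus (n : Int) (mode : String) (out : List (List Int)) : Prop := out = get_permus_alt n mode
instance (n : Int) (mode : String) (out : List (List Int)) : Decidable (Spec_get_permus n mode out) := by unfold Spec_get_permus; infer_instance

-- ===== CLAIM (what is proved, stated in full; the proofs are below) =====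
def Claim_equal_get_permus : Prop := ∀ (n : Int) (mode : String), Dom_get_permus n mode → Pre_get_permus n mode → Spec_get_permus n mode (get_permus n mode)

-- ===== LEMMAS AND PROOFS =====

-- one bin row of B
def pvBinRow (N i : Nat) : List Int :=
  (List.range N).map (fun j => (((i >>> (N - 1 - j)) &&& 1 : Nat) : Int))

-- bit k of 2^N + i equals bit k of i, for k < N
lemma pvBit_add_pow (N i k : Nat) (hk : k < N) :
    ((2 ^ N + i) >>> k) &&& 1 = (i >>> k) &&& 1 := by
  have h2 : 2 ^ N = 2 ^ (N - k) * 2 ^ k := by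
    rw [← pow_add]; congr 1; omega
  have hdiv : (2 ^ N + i) / 2 ^ k = 2 ^ (N - k) + i / 2 ^ k := by
    rw [h2, Nat.add_comm, Nat.add_mul_div_right _ _ (Nat.two_pow_pos k), Nat.add_comm]
  have he : 2 ^ (N - k) = 2 * 2 ^ (N - k - 1) := by
    rw [← pow_succ']; congr 1; omega
  simp only [Nat.shiftRight_eq_div_pow, Nat.and_one_is_mod, hdiv, he]
  omega

lemma pvBinRow_low (N i : Nat) (hi : i < 2 ^ N) :
    pvBinRow (N + 1) i = (0 : Int) :: pvBinRow N i := by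
  unfold pvBinRow
  rw [List.range_succ_eq_map]
  simp only [List.map_cons, List.map_map]
  congr 1
  · have he : N + 1 - 1 - 0 = N := by omega
    have h : i >>> N = 0 := by
      simp only [Nat.shiftRight_eq_div_pow]
      exact Nat.div_eq_of_lt hi
    rw [he, h]; decide
  · apply List.map_congr_left
    intro j hj
    simp only [Function.comp_apply]
    have he : N + 1 - 1 - Nat.succ j = N - 1 - j := by omega
    rw [he]

lemma pvBinRow_high (N i : Nat) (hi : i < 2 ^ N) :
    pvBinRow (N + 1) (2 ^ N + i) = (1 : Int) :: pvBinRow N i := by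
  unfold pvBinRow
  rw [List.range_succ_eq_map]
  simp only [List.map_cons, List.map_map]
  congr 1
  · have he : N + 1 - 1 - 0 = N := by omega
    have hd : (2 ^ N + i) / 2 ^ N = 1 := by
      rw [Nat.add_comm, Nat.add_div_right _ (Nat.two_pow_pos N)]
      rw [Nat.div_eq_of_lt hi]
    have h : (2 ^ N + i) >>> N = 1 := by
      simp only [Nat.shiftRight_eq_div_pow]
      exact hd
    rw [he, h]; decide
  · apply List.map_congr_left
    intro j hj
    simp only [Function.comp_apply, List.mem_range] at *
    have hk : N + 1 - 1 - Nat.succ j = N - 1 - j := by omega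
    rw [hk, pvBit_add_pow N i (N - 1 - j) (by omega)]

-- A's bin-mode configs equal B's bin-mode rows
lemma pvBin_eq (N : Nat) :
    (pvProd01 N).map (fun s => s.map (fun c => (PySem.Int.ofChars? [c]).getD 0))
      = (List.range (2 ^ N)).map (pvBinRow N) := by
  induction N with
  | zero => decide
  | succ N ih =>
    have hpow : 2 ^ (N + 1) = 2 ^ N + 2 ^ N := by ring
    rw [pvProd01, hpow, List.range_add]
    simp only [List.flatMap_cons, List.flatMap_nil, List.append_nil, List.map_append,
      List.map_map]
    congr 1
    · calc (pvProd01 N).map ((fun s => s.map (fun c => (PySem.Int.ofChars? [c]).getD 0)) ∘ (fun r => '0' :: r))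
          = ((pvProd01 N).map (fun s => s.map (fun c => (PySem.Int.ofChars? [c]).getD 0))).map (fun r => (0 : Int) :: r) := by
            simp only [List.map_map]
            apply List.map_congr_left; intro r _
            have h0 : (PySem.Int.ofChars? ['0']).getD 0 = (0 : Int) := by decide
            simp [h0]
      _ = ((List.range (2 ^ N)).map (pvBinRow N)).map (fun r => (0 : Int) :: r) := by rw [ih]
      _ = (List.range (2 ^ N)).map (pvBinRow (N + 1)) := by
            rw [List.map_map]; apply List.map_congr_left; intro i hi
            simp only [Function.comp]
            rw [pvBinRow_low N i (List.mem_range.mp hi)]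
    · calc (pvProd01 N).map ((fun s => s.map (fun c => (PySem.Int.ofChars? [c]).getD 0)) ∘ (fun r => '1' :: r))
          = ((pvProd01 N).map (fun s => s.map (fun c => (PySem.Int.ofChars? [c]).getD 0))).map (fun r => (1 : Int) :: r) := by
            simp only [List.map_map]
            apply List.map_congr_left; intro r _
            have h1 : (PySem.Int.ofChars? ['1']).getD 0 = (1 : Int) := by decide
            simp [h1]
      _ = ((List.range (2 ^ N)).map (pvBinRow N)).map (fun r => (1 : Int) :: r) := by rw [ih]
      _ = (List.range (2 ^ N)).map (fun i => pvBinRow (N + 1) (2 ^ N + i)) := by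
            rw [List.map_map]; apply List.map_congr_left; intro i hi
            simp only [Function.comp]
            rw [pvBinRow_high N i (List.mem_range.mp hi)]

-- neg remap of a bin row is B's neg row
lemma pvNegRow (N i : Nat) :
    (pvBinRow N i).map (fun x => if x = 0 then (-1 : Int) else x)
      = (List.range N).map (fun j => if (i >>> (N - 1 - j)) &&& 1 ≠ 0 then (1 : Int) else -1) := by
  unfold pvBinRow
  rw [List.map_map]
  apply List.map_congr_left
  intro j hj
  simp only [Function.comp]
  have := Nat.and_one_is_mod (i >>> (N - 1 - j))
  rcases Nat.mod_two_eq_zero_or_one (i >>> (N - 1 - j)) with h | h <;>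
    simp [this, h]

-- ===== VERDICT (by name: the statement is the Claim_ definition above) =====
theorem get_permus_spec : Claim_equal_get_permus := by
  intro n mode _ _
  unfold Spec_get_permus get_permus get_permus_alt
  by_cases hm : mode = "neg"
  · simp only [hm]
    rw [pvBin_eq, List.map_map]
    apply List.map_congr_left
    intro i _
    exact pvNegRow n.toNat i
  · simp only [if_neg hm]
    exact pvBin_eq n.toNat
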